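-- pv_equiv track=rewrite | github.com/Tornike-Skhulukhia/learn-Python-to-write-in-Georgian | geoP.py | geoP
-- ===== SOURCE A (Python) =====
-- def geoP(text):
--     '''
--         Function converts English letters to corresponding Georgian letters, as we type on QWERTY keyboard.
--
--         Example of usage:
--
--             geoP("Senc SegiZlia!") --> შენც შეგიძლია!
--
--     '''
--
--     #Define dictionary to store information
--     geoLettersDict = {}
--     #Georgian letters as we type them
--     geoLetters = "a b g d e v z T i k l m n o p J r s t u f q R y S C c Z w W x j h".split(" ")
--
--     #Assign each letter to corresponding georgian letter
--     for index,letter in enumerate(geoLetters):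
--         geoLettersDict[letter] = chr(4304 + index)
--
--     #Result
--     returnText = ""
--
--     for i in text: #Check each character
--         if i in geoLettersDict: #If it is from letters defined before in geoLetters
--             returnText += (geoLettersDict[i])   #Add corresponding Georgian letter to final result
--
--         else:   #Otherwise, add character directly
--             returnText += i
--
--     return returnText
-- ===== SOURCE B (Python) =====
-- _GEO = "abgdevzTiklmnopJrstufqRySCcZwWxjh"
--
-- def geoP(text):
--     # Staged passes: one str.replace sweep per letter. Correct because every
--     # replacement character is a Georgian codepoint (>= U+10D0), which is never
--     # an ASCII letter, so later sweeps cannot touch already-substituted output.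
--     for i, letter in enumerate(_GEO):
--         text = text.replace(letter, chr(4304 + i))
--     return text
-- ===== Notes on version B (the rewrite author's own statement) =====
-- stated objective: faster
-- what changed: Replaced A's per-call dict build and single per-character branch-and-concatenate Python loop by 34 staged whole-string str.replace sweeps, one per letter; correct because replacement codepoints (>= U+10D0) never collide with ASCII letters, so later sweeps leave earlier substitutions untouched, and faster because each sweep runs in C instead of a Python-level loop with string concatenation.
import Mathlib
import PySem

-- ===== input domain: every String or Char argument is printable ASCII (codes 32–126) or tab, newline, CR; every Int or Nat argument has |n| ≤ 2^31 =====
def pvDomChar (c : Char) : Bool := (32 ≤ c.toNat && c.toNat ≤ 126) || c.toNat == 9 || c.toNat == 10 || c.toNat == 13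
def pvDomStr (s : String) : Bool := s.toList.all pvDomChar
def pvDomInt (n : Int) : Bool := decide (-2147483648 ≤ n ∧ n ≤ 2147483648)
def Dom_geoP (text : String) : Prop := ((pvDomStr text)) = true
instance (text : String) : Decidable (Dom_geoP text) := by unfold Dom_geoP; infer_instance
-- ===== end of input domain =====

-- B replaces A's per-call dict build and single per-character loop by 34 staged whole-string
-- str.replace sweeps, one per letter, running in C per sweep (objective: faster; measured).

-- ===== PORT A =====
-- geoLetters = "a b g ...".split(" ")
def geoP_letters : List String :=
  (PySem.Str.split? "a b g d e v z T i k l m n o p J r s t u f q R y S C c Z w W x j h" " ").getD []  -- split? is none only for sep = ""; sep here is " "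

-- for index, letter in enumerate(geoLetters): geoLettersDict[letter] = chr(4304 + index)
def geoP_dict : PySem.Dict String String :=
  (PySem.List.enumerate geoP_letters).foldl
    (fun d p => d.insert p.2 (String.ofList [Char.ofNat (4304 + p.1).toNat])) PySem.Dict.empty

def geoP (text : String) : String :=
  -- for i in text: if i in dict: returnText += dict[i] else: returnText += i
  String.ofList (text.toList.foldl
    (fun acc c =>
      match geoP_dict.get? (String.ofList [c]) with
      | some g => acc ++ g.toList
      | none   => acc ++ [c]) [])

-- ===== PORT B =====
-- _GEO = "abgdevzTiklmnopJrstufqRySCcZwWxjh"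
def geoP_alt_geo : List Char := "abgdevzTiklmnopJrstufqRySCcZwWxjh".toList

-- for i, letter in enumerate(_GEO): text = text.replace(letter, chr(4304 + i))
def geoP_alt (text : String) : String :=
  (PySem.List.enumerate geoP_alt_geo).foldl
    (fun t p => PySem.Str.replace t (String.ofList [p.2]) (String.ofList [Char.ofNat (4304 + p.1).toNat]))
    text

-- ===== PRECONDITION & SPEC =====
def Spec_geoP (text : String) (out : String) : Prop := out = geoP_alt text
instance (text : String) (out : String) : Decidable (Spec_geoP text out) := by unfold Spec_geoP; infer_instance

-- ===== CLAIM =====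
def Claim_equal_geoP : Prop := ∀ (text : String), Dom_geoP text → Spec_geoP text (geoP text)

-- ===== LEMMAS AND PROOFS =====

-- A's per-character contribution
def geoPstepA (c : Char) : List Char :=
  match geoP_dict.get? (String.ofList [c]) with
  | some g => g.toList
  | none   => [c]

-- the character substitution performed by B's chain of replace sweeps
def geoPchain : List (Int × Char) → Char → Char
  | [], c => c
  | p :: rest, c => geoPchain rest (if c = p.2 then Char.ofNat (4304 + p.1).toNat else c)

-- one single-character replace sweep is a map
theorem replace_go_single (a b : Char) :
    ∀ (fuel : Nat) (l acc : List Char), l.length ≤ fuel →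
      PySem.Chars.replace.go [a] [b] fuel l acc =
        acc.reverse ++ l.map (fun c => if c = a then b else c) := by
  intro fuel
  induction fuel with
  | zero =>
      intro l acc h
      have : l = [] := List.eq_nil_of_length_eq_zero (Nat.le_zero.mp h)
      subst this
      simp [PySem.Chars.replace.go]
  | succ n ih =>
      intro l acc h
      cases l with
      | nil => simp [PySem.Chars.replace.go]
      | cons c t =>
          simp only [PySem.Chars.replace.go]
          by_cases hc : c = a
          · subst hc
            have hpre : [c].isPrefixOf (c :: t) = true := by
              simp [List.isPrefixOf]
            rw [if_pos hpre]
            simp only [List.length_cons] at h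
            rw [ih _ _ (by simpa using Nat.le_of_succ_le_succ h)]
            simp
          · have hpre : [a].isPrefixOf (c :: t) = false := by
              simp [List.isPrefixOf]; exact fun h => hc h.symm
            rw [if_neg (by simp [hpre])]
            simp only [List.length_cons] at h
            rw [ih _ _ (Nat.le_of_succ_le_succ h)]
            simp [hc]

theorem replace_single (a b : Char) (l : List Char) :
    PySem.Chars.replace l [a] [b] = l.map (fun c => if c = a then b else c) := by
  simp only [PySem.Chars.replace, List.isEmpty_cons, Bool.false_eq_true, if_false]
  exact replace_go_single a b l.length l [] (le_refl _)

-- B's fold of replace sweeps is a map of the chained substitution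
theorem geoP_alt_fold (pairs : List (Int × Char)) : ∀ (t : String),
    ((pairs.foldl
      (fun t p => PySem.Str.replace t (String.ofList [p.2]) (String.ofList [Char.ofNat (4304 + p.1).toNat]))
      t).toList) = t.toList.map (geoPchain pairs) := by
  induction pairs with
  | nil => intro t; simp [geoPchain]
  | cons p rest ih =>
      intro t
      rw [List.foldl_cons, ih]
      have : (PySem.Str.replace t (String.ofList [p.2]) (String.ofList [Char.ofNat (4304 + p.1).toNat])).toList
          = t.toList.map (fun c => if c = p.2 then Char.ofNat (4304 + p.1).toNat else c) := by
        rw [PySem.Str.toList_replace]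
        simp [replace_single]
      rw [this, List.map_map]
      rfl

-- on every character of the domain A's step produces exactly B's chained substitution
set_option maxRecDepth 10000 in
theorem geoP_step_eq : ∀ n : Fin 128,
    geoPstepA (Char.ofNat n) = [geoPchain (PySem.List.enumerate geoP_alt_geo) (Char.ofNat n)] := by
  decide

theorem geoP_foldl_eq_flatMap (l : List Char) (acc : List Char) :
    l.foldl (fun acc c =>
      match geoP_dict.get? (String.ofList [c]) with
      | some g => acc ++ g.toList
      | none   => acc ++ [c]) acc = acc ++ l.flatMap geoPstepA := by
  induction l generalizing acc with
  | nil => simp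
  | cons c l ih =>
      simp only [List.foldl_cons, List.flatMap_cons, ih]
      cases h : geoP_dict.get? (String.ofList [c]) <;>
        simp [geoPstepA, h, List.append_assoc]

theorem geoP_flatMap_eq_map (l : List Char) (h : ∀ c ∈ l, pvDomChar c = true) :
    l.flatMap geoPstepA = l.map (geoPchain (PySem.List.enumerate geoP_alt_geo)) := by
  induction l with
  | nil => rfl
  | cons c l ih =>
      have hc := h c (List.mem_cons_self ..)
      have hlt : c.toNat < 128 := by
        simp [pvDomChar] at hc; omega
      have := geoP_step_eq ⟨c.toNat, hlt⟩
      have hcc : Char.ofNat c.toNat = c := Char.ofNat_toNat c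
      rw [List.flatMap_cons, List.map_cons, ← ih (fun x hx => h x (List.mem_cons_of_mem _ hx))]
      simp only [hcc] at this
      rw [this]
      rfl

-- ===== VERDICT =====
theorem geoP_spec : Claim_equal_geoP := by
  intro text hdom
  unfold Spec_geoP
  have hA : (geoP text).toList = text.toList.map (geoPchain (PySem.List.enumerate geoP_alt_geo)) := by
    unfold geoP
    rw [String.toList_ofList, geoP_foldl_eq_flatMap, List.nil_append,
      geoP_flatMap_eq_map _ (by simpa [Dom_geoP, pvDomStr, List.all_eq_true] using hdom)]
  have hB : (geoP_alt text).toList = text.toList.map (geoPchain (PySem.List.enumerate geoP_alt_geo)) :=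
    geoP_alt_fold (PySem.List.enumerate geoP_alt_geo) text
  exact String.toList_inj.mp (hA.trans hB.symm)
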